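-- pv_equiv track=rewrite | github.com/HovhannesMkrtchyan2004/Python_Homewhork | Lesson 33.py | get_coord_enimals
-- ===== SOURCE A (Python) =====
-- def get_coord_enimals(board):
--     flag = False
--     enimal_1 = list()
--     for i in range(len(board)):
--         for j in range(len(board[i])):
--             if not (enimal_1) and board[i][j] == 10:
--                 enimal_1 = [i, j]
--             elif enimal_1 and board[i][j] == 10:
--                 enimal_2 = [i, j]
--                 flag = True
--     if flag:
--         return [enimal_1, enimal_2]
--     else:
--         return enimal_1
-- ===== SOURCE B (Python) =====
-- def _first10(board):
--     for i in range(len(board)):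
--         row = board[i]
--         for j in range(len(row)):
--             if row[j] == 10:
--                 return [i, j]
--     return None
--
--
-- def _last10(board):
--     for i in range(len(board) - 1, -1, -1):
--         row = board[i]
--         for j in range(len(row) - 1, -1, -1):
--             if row[j] == 10:
--                 return [i, j]
--     return None
--
--
-- def get_coord_enimals(board):
--     first = _first10(board)
--     if first is None:
--         return []
--     last = _last10(board)
--     if first == last:
--         return first
--     return [first, last]
-- ===== Notes on version B (the rewrite author's own statement) =====
-- stated objective: alternative
-- what changed: B replaces A's single exhaustive pass mutating a flag and two accumulators by two staged directional scans with early exit: a forward scan returning the first 10 immediately, and, only if one exists, a reverse scan (rows and columns backwards) returning the last 10, then a branch on whether they coincide.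
-- outside the precondition, e.g. on get_coord_enimals([[10]]): A returns [0, 0], B returns [0, 0]
import Mathlib
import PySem

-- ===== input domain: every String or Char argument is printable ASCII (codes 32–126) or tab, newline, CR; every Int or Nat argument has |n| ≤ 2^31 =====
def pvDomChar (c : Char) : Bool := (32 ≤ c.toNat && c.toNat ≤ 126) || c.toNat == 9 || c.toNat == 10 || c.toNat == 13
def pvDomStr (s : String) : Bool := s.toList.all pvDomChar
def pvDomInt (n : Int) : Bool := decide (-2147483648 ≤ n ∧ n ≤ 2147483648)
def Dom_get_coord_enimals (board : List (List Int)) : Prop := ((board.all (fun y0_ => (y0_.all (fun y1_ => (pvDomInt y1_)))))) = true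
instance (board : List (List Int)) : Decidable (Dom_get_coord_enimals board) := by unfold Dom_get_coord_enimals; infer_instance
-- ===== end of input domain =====

-- B replaces A's single exhaustive pass mutating a flag and two accumulators by two staged
-- directional scans with early exit: forward for the first 10, backward for the last.

-- ===== PORT A =====
-- State is (flag, enimal_1, enimal_2); Python's enimal_2 is unassigned until the second
-- match — it is only read when flag is true, so carrying [] as its initial value is exact.
def get_coord_enimals (board : List (List Int)) : List (List Int) :=
  let s := (PySem.List.enumerate board).foldl
    (fun s p =>
      (PySem.List.enumerate p.2).foldl
        (fun (s : Bool × List Int × List Int) q =>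
          if s.2.1 = [] ∧ q.2 = 10 then (s.1, [p.1, q.1], s.2.2)
          else if s.2.1 ≠ [] ∧ q.2 = 10 then (true, s.2.1, [p.1, q.1])
          else s)
        s)
    (false, [], [])
  if s.1 then [s.2.1, s.2.2]
  -- Python returns the flat enimal_1 here: [] when no 10 was found (exact below), or
  -- [i, j] on a single occurrence — a value outside List (List Int), excluded by Pre_.
  else s.2.1.map (fun n => [n])

-- ===== PORT B =====
-- scan a row (given as index/value pairs, already in the intended direction) for the first 10
def pvScanRow (i : Int) : List (Int × Int) → Option (List Int)
  | [] => none
  | q :: qs => if q.2 = 10 then some [i, q.1] else pvScanRow i qs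

-- _first10: forward scan over the rows, early return on the first match
def pvFirst10 : List (Int × List Int) → Option (List Int)
  | [] => none
  | p :: ps =>
    match pvScanRow p.1 (PySem.List.enumerate p.2) with
    | some r => some r
    | none => pvFirst10 ps

-- _last10: rows taken back to front (the caller reverses), each row scanned right to left
def pvLast10 : List (Int × List Int) → Option (List Int)
  | [] => none
  | p :: ps =>
    match pvScanRow p.1 (PySem.List.enumerate p.2).reverse with
    | some r => some r
    | none => pvLast10 ps

def get_coord_enimals_alt (board : List (List Int)) : List (List Int) :=
  match pvFirst10 (PySem.List.enumerate board) with
  | none => []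
  | some first =>
    -- a last 10 always exists once a first one does, so getD [] is never read
    let last := (pvLast10 (PySem.List.enumerate board).reverse).getD []
    -- Python returns the flat first here on a single occurrence — outside
    -- List (List Int), excluded by Pre_; the singleton list stands in for it.
    if first = last then [first] else [first, last]

-- ===== PRECONDITION & SPEC =====
-- Pre_ excludes boards containing exactly one cell equal to 10: there A returns the flat
-- list [i, j], which is not a value of the declared type List (List Int).
def Pre_get_coord_enimals (board : List (List Int)) : Prop :=
  (board.map (fun row => row.count 10)).sum ≠ 1
instance (board : List (List Int)) : Decidable (Pre_get_coord_enimals board) := by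
  unfold Pre_get_coord_enimals; infer_instance
def pvWitness_get_coord_enimals : List (List Int) := [[1, 10], [10, 2]]
def Spec_get_coord_enimals (board : List (List Int)) (out : List (List Int)) : Prop := out = get_coord_enimals_alt board
instance (board : List (List Int)) (out : List (List Int)) : Decidable (Spec_get_coord_enimals board out) := by unfold Spec_get_coord_enimals; infer_instance

-- ===== CLAIM (what is proved, stated in full; the proofs are below) =====
def Claim_equal_get_coord_enimals : Prop := ∀ (board : List (List Int)), Dom_get_coord_enimals board → Pre_get_coord_enimals board → Spec_get_coord_enimals board (get_coord_enimals board)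

-- ===== LEMMAS AND PROOFS =====

-- the cell-to-coordinate selector both proofs talk about
def pvSel (i : Int) (q : Int × Int) : Option (List Int) :=
  if q.2 = 10 then some [i, q.1] else none

-- the row-major list of all 10-coordinates (proof vocabulary only; neither port computes it)
def pvPos (board : List (List Int)) : List (List Int) :=
  (PySem.List.enumerate board).flatMap
    (fun p => (PySem.List.enumerate p.2).filterMap (pvSel p.1))

-- ---- A's fold characterised over pvPos ----

-- A's loop body, restricted to the matching cells (p is the coordinate pair [i, j]).
def pvStep (s : Bool × List Int × List Int) (p : List Int) : Bool × List Int × List Int :=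
  if s.2.1 = [] then (s.1, p, s.2.2) else (true, s.2.1, p)

theorem pv_inner_eq (i : Int) :
    ∀ (l : List (Int × Int)) (s : Bool × List Int × List Int),
      l.foldl
        (fun (s : Bool × List Int × List Int) q =>
          if s.2.1 = [] ∧ q.2 = 10 then (s.1, [i, q.1], s.2.2)
          else if s.2.1 ≠ [] ∧ q.2 = 10 then (true, s.2.1, [i, q.1])
          else s)
        s
        = (l.filterMap (pvSel i)).foldl pvStep s := by
  intro l
  induction l with
  | nil => intro s; rfl
  | cons x xs ih =>
    intro s
    simp only [List.foldl_cons, List.filterMap_cons]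
    by_cases h10 : x.2 = 10
    · by_cases hnil : s.2.1 = [] <;> simp [pvSel, h10, hnil, pvStep, ih]
    · simp [pvSel, h10, ih]

theorem pv_outer_eq :
    ∀ (L : List (Int × List Int)) (s : Bool × List Int × List Int),
      L.foldl
        (fun s p =>
          (PySem.List.enumerate p.2).foldl
            (fun (s : Bool × List Int × List Int) q =>
              if s.2.1 = [] ∧ q.2 = 10 then (s.1, [p.1, q.1], s.2.2)
              else if s.2.1 ≠ [] ∧ q.2 = 10 then (true, s.2.1, [p.1, q.1])
              else s)
            s)
        s
        = (L.flatMap (fun p => (PySem.List.enumerate p.2).filterMap (pvSel p.1))).foldl pvStep s := by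
  intro L
  induction L with
  | nil => intro s; rfl
  | cons x xs ih =>
    intro s
    simp only [List.foldl_cons, List.flatMap_cons, List.foldl_append]
    rw [pv_inner_eq x.1, ih]

theorem pvStep_run :
    ∀ (l : List (List Int)) (fl : Bool) (p e2 : List Int), p ≠ [] → l ≠ [] →
      l.foldl pvStep (fl, p, e2) = (true, p, l.getLastD e2) := by
  intro l
  induction l with
  | nil => intro _ _ _ _ h; exact absurd rfl h
  | cons x xs ih =>
    intro fl p e2 hp _
    simp only [List.foldl_cons, List.getLastD_cons]
    have hstep : pvStep (fl, p, e2) x = (true, p, x) := by simp [pvStep, hp]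
    rw [hstep]
    rcases xs with _ | ⟨y, r⟩
    · rfl
    · exact ih true p x hp (by simp)

-- ---- B's scans characterised over pvPos ----

theorem pvScanRow_eq (i : Int) :
    ∀ (l : List (Int × Int)), pvScanRow i l = (l.filterMap (pvSel i)).head? := by
  intro l
  induction l with
  | nil => rfl
  | cons x xs ih =>
    simp only [pvScanRow, List.filterMap_cons]
    by_cases h10 : x.2 = 10
    · simp [pvSel, h10]
    · simp [pvSel, h10, ih]

theorem pvFirst10_eq :
    ∀ (L : List (Int × List Int)),
      pvFirst10 L
        = (L.flatMap (fun p => (PySem.List.enumerate p.2).filterMap (pvSel p.1))).head? := by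
  intro L
  induction L with
  | nil => rfl
  | cons x xs ih =>
    simp only [pvFirst10, List.flatMap_cons, pvScanRow_eq]
    rcases h : ((PySem.List.enumerate x.2).filterMap (pvSel x.1)) with _ | ⟨a, r⟩
    · simpa using ih
    · simp

theorem pvLast10_eq :
    ∀ (L : List (Int × List Int)),
      pvLast10 L
        = (L.flatMap (fun p => ((PySem.List.enumerate p.2).filterMap (pvSel p.1)).reverse)).head? := by
  intro L
  induction L with
  | nil => rfl
  | cons x xs ih =>
    have hrev : (PySem.List.enumerate x.2).reverse.filterMap (pvSel x.1)
        = ((PySem.List.enumerate x.2).filterMap (pvSel x.1)).reverse := by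
      rw [List.filterMap_reverse]
    simp only [pvLast10, List.flatMap_cons, pvScanRow_eq, hrev]
    rcases h : ((PySem.List.enumerate x.2).filterMap (pvSel x.1)).reverse with _ | ⟨a, r⟩
    · simpa using ih
    · simp

theorem pvLast10_reverse (board : List (List Int)) :
    pvLast10 (PySem.List.enumerate board).reverse = (pvPos board).getLast? := by
  rw [pvLast10_eq, List.getLast?_eq_head?_reverse]
  unfold pvPos
  rw [List.reverse_flatMap]
  rfl

-- ---- pvPos facts ----

theorem pv_len_pos (board : List (List Int)) :
    (pvPos board).length = (board.map (fun row => row.count 10)).sum := by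
  unfold pvPos
  rw [List.length_flatMap]
  have hrow : ∀ (p : Int × List Int),
      ((PySem.List.enumerate p.2).filterMap (pvSel p.1)).length = p.2.count 10 := by
    intro p
    rw [List.length_filterMap_eq_countP]
    have h2 := PySem.List.map_snd_enumerate p.2 0
    calc (PySem.List.enumerate p.2).countP (fun a => ((pvSel p.1 a).isSome : Bool))
        = (PySem.List.enumerate p.2).countP (fun a => decide (a.2 = 10)) := by
          apply List.countP_congr; intro a _; by_cases h : a.2 = 10 <;> simp [pvSel, h]
      _ = ((PySem.List.enumerate p.2).map (·.2)).countP (fun v => decide (v = 10)) := by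
          rw [List.countP_map]; rfl
      _ = p.2.count 10 := by rw [h2, List.count]; rfl
  rw [List.map_congr_left (fun p _ => hrow p)]
  have h2 := PySem.List.map_snd_enumerate board 0
  calc ((PySem.List.enumerate board).map (fun p => p.2.count 10)).sum
      = (((PySem.List.enumerate board).map (·.2)).map (fun row => row.count 10)).sum := by
        rw [List.map_map]; rfl
    _ = (board.map (fun row => row.count 10)).sum := by rw [h2]

theorem pv_pos_mem_ne_nil (board : List (List Int)) :
    ∀ p ∈ pvPos board, p ≠ [] := by
  intro p hp
  unfold pvPos at hp
  simp only [List.mem_flatMap, List.mem_filterMap] at hp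
  obtain ⟨a, _, q, _, hq⟩ := hp
  by_cases h : q.2 = 10
  · rw [pvSel, if_pos h] at hq; cases hq; simp
  · rw [pvSel, if_neg h] at hq; cases hq

-- every coordinate a row contributes starts with that row's index
theorem pv_mem_row (i : Int) (l : List (Int × Int)) :
    ∀ x ∈ l.filterMap (pvSel i), ∃ j, x = [i, j] ∧ j ∈ l.map (·.1) := by
  intro x hx
  simp only [List.mem_filterMap] at hx
  obtain ⟨q, hq, hsel⟩ := hx
  by_cases h : q.2 = 10
  · rw [pvSel, if_pos h] at hsel; cases hsel
    exact ⟨q.1, rfl, List.mem_map_of_mem hq⟩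
  · rw [pvSel, if_neg h] at hsel; cases hsel

-- within one row the contributed coordinates are pairwise distinct
theorem pv_row_pairwise (i : Int) :
    ∀ (l : List (Int × Int)), l.Pairwise (fun a b => a.1 ≠ b.1) →
      (l.filterMap (pvSel i)).Pairwise (· ≠ ·) := by
  intro l
  induction l with
  | nil => intro _; simp
  | cons q qs ih =>
    intro hpw
    rw [List.pairwise_cons] at hpw
    simp only [List.filterMap_cons]
    by_cases h : q.2 = 10
    · rw [pvSel, if_pos h, List.pairwise_cons]
      refine ⟨?_, ih hpw.2⟩
      intro x hx
      obtain ⟨j, hxj, hjmem⟩ := pv_mem_row i qs x hx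
      subst hxj
      simp only [List.mem_map] at hjmem
      obtain ⟨q', hq', hj⟩ := hjmem
      have := hpw.1 q' hq'
      intro hEq
      apply this
      have : q.1 = j := by injection hEq with _ t; injection t
      omega
    · rw [pvSel, if_neg h]; exact ih hpw.2

theorem pv_pos_pairwise (board : List (List Int)) :
    (pvPos board).Pairwise (· ≠ ·) := by
  unfold pvPos
  rw [List.pairwise_flatMap]
  constructor
  · intro a _
    exact pv_row_pairwise a.1 _
      ((PySem.List.pairwise_lt_enumerate a.2 0).imp (fun h => ne_of_lt h))
  · have hlt := PySem.List.pairwise_lt_enumerate board 0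
    refine hlt.imp ?_
    intro p p' hpp x hx y hy
    obtain ⟨j, hxj, _⟩ := pv_mem_row p.1 _ x hx
    obtain ⟨j', hyj, _⟩ := pv_mem_row p'.1 _ y hy
    subst hxj; subst hyj
    intro hEq
    injection hEq with h1 _
    omega

-- ===== VERDICT (by name: the statement is the Claim_ definition above) =====
theorem get_coord_enimals_spec : Claim_equal_get_coord_enimals := by
  intro board _ hpre
  unfold Spec_get_coord_enimals
  have ha : get_coord_enimals board
      = (let s := (pvPos board).foldl pvStep (false, [], []);
          if s.1 then [s.2.1, s.2.2] else s.2.1.map (fun n => [n])) := by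
    unfold get_coord_enimals
    rw [pv_outer_eq]
    rfl
  have hb : get_coord_enimals_alt board
      = (match (pvPos board).head? with
         | none => []
         | some first =>
           let last := ((pvPos board).getLast?).getD []
           if first = last then [first] else [first, last]) := by
    unfold get_coord_enimals_alt
    rw [pvFirst10_eq, pvLast10_reverse]
    rfl
  rw [ha, hb]
  have hmem := pv_pos_mem_ne_nil board
  have hpw := pv_pos_pairwise board
  rcases hP : pvPos board with _ | ⟨p, rest⟩
  · simp
  · rcases rest with _ | ⟨q, r⟩
    · exfalso; apply hpre; rw [← pv_len_pos, hP]; rfl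
    · have hp : p ≠ [] := hmem p (by rw [hP]; simp)
      have h1 : pvStep (false, [], []) p = (false, p, []) := by simp [pvStep]
      rw [List.foldl_cons, h1, pvStep_run (q :: r) false p [] hp (by simp)]
      rw [hP] at hpw
      rw [List.pairwise_cons] at hpw
      have hlast_mem : (q :: r).getLastD [] ∈ q :: r := by
        rw [List.getLastD_eq_getLast?]
        rcases h : (q :: r).getLast? with _ | x
        · simp at h
        · simpa using List.mem_of_getLast? h
      have hne : p ≠ (q :: r).getLastD [] := hpw.1 _ hlast_mem
      have hgl : (q :: r).getLast? = some ((q :: r).getLastD []) := by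
        rw [List.getLastD_eq_getLast?]
        rcases h : (q :: r).getLast? with _ | x
        · simp at h
        · rfl
      have hne2 : ¬ p = (q :: r).getLast?.getD [] := by
        rw [hgl]; exact hne
      simp [hne2]
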